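-- pv_equiv track=rewrite | github.com/Butskov/Bioinformatics-Algorithms | week7-8/20 - ConvolutionCyclopeptideSequencing.py | make_score
-- ===== SOURCE A (Python) =====
-- def make_score(peptide, spectrum):
--     ls = cyclospectrum(peptide)
--     cs = spectrum.copy()
--     score = 0
--     for c in ls:
--         if c in cs:
--             score += 1
--             cs.remove(c)
--     return score
--
-- def cyclospectrum(peptide):
--     prefix_mass = [0]
--     for i in range(len(peptide)):
--         prefix_mass.append(prefix_mass[i]+peptide[i])
--
--     theoretical_spectrum = [0]
--     for i in range(len(prefix_mass) - 1):
--         for j in range(i + 1, len(prefix_mass)):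
--             theoretical_spectrum.append(prefix_mass[j]-prefix_mass[i])
--             if i > 0 and j < len(prefix_mass)-1:
--                 theoretical_spectrum.append(prefix_mass[-1] - (prefix_mass[j] - prefix_mass[i]))
--     return sorted(theoretical_spectrum)
-- ===== SOURCE B (Python) =====
-- def make_score(peptide, spectrum):
--     # sort-then-merge: count the multiset intersection with one two-pointer
--     # pass instead of A's per-element 'in'/'remove' linear scans
--     ls = cyclospectrum(peptide)   # already sorted
--     sp = sorted(spectrum)
--     i = j = score = 0
--     while i < len(ls) and j < len(sp):
--         if ls[i] == sp[j]:
--             score += 1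
--             i += 1
--             j += 1
--         elif ls[i] < sp[j]:
--             i += 1
--         else:
--             j += 1
--     return score
--
-- def cyclospectrum(peptide):
--     # prefix sums by a running accumulator, fragments by one flat comprehension
--     pm = [0]
--     acc = 0
--     for m in peptide:
--         acc += m
--         pm.append(acc)
--     n = len(pm)
--     frags = [0] + [f
--                    for i in range(n - 1)
--                    for j in range(i + 1, n)
--                    for f in ([pm[j] - pm[i]] if i == 0 or j == n - 1
--                              else [pm[j] - pm[i], acc - (pm[j] - pm[i])])]
--     return sorted(frags)
-- ===== Notes on version B (the rewrite author's own statement) =====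
-- stated objective: faster
-- what changed: B scores by sorting a copy of the spectrum and counting the multiset intersection with a single two-pointer merge over the two sorted lists, replacing A's per-element 'in'/'remove' linear scans; the cyclospectrum is built with a running prefix-sum accumulator and one flat comprehension instead of A's indexed prefix loop and nested append loops.
import Mathlib
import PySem

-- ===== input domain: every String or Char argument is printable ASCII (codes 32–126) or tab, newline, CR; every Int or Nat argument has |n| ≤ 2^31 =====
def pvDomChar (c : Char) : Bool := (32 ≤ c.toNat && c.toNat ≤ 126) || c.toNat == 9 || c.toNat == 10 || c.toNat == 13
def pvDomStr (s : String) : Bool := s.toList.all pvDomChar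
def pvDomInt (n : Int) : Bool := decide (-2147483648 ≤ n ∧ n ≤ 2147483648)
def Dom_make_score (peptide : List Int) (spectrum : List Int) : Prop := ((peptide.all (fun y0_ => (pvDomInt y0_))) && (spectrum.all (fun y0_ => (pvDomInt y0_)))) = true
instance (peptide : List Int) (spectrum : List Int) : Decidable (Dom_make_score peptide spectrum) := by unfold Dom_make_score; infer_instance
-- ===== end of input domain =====

-- B sorts a copy of the spectrum and counts the multiset intersection by one two-pointer
-- merge (replacing A's per-element 'in'/'remove' scans), and builds the cyclospectrum with
-- an accumulator + flat comprehension; return values proved equal on all inputs.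

-- ===== PORT A =====
def cyclospectrumA (peptide : List Int) : List Int :=
  let prefix_mass : List Int :=
    (PySem.List.pyRange 0 (peptide.length : Int) 1).foldl
      (fun pm i => pm ++ [PySem.List.pyGetD pm i 0 + PySem.List.pyGetD peptide i 0]) [0]
  let ts : List Int :=
    (PySem.List.pyRange 0 ((prefix_mass.length : Int) - 1) 1).foldl (fun ts i =>
      (PySem.List.pyRange (i + 1) (prefix_mass.length : Int) 1).foldl (fun ts j =>
        let ts := ts ++ [PySem.List.pyGetD prefix_mass j 0 - PySem.List.pyGetD prefix_mass i 0]
        if 0 < i ∧ j < (prefix_mass.length : Int) - 1 then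
          ts ++ [PySem.List.pyGetD prefix_mass (-1) 0 -
                 (PySem.List.pyGetD prefix_mass j 0 - PySem.List.pyGetD prefix_mass i 0)]
        else ts) ts) [0]
  PySem.List.sorted ts (fun x => x) false

def make_score (peptide : List Int) (spectrum : List Int) : Int :=
  let ls := cyclospectrumA peptide
  let cs := spectrum  -- spectrum.copy()
  (ls.foldl (fun (st : Int × List Int) c =>
      if st.2.contains c then
        match PySem.List.remove? st.2 c with
        | some cs' => (st.1 + 1, cs')
        | none => st
      else st) ((0 : Int), cs)).1

-- ===== PORT B =====
def cyclospectrumB (peptide : List Int) : List Int :=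
  let st := peptide.foldl (fun (st : List Int × Int) m => (st.1 ++ [st.2 + m], st.2 + m)) ([0], 0)
  let pm := st.1
  let acc := st.2
  let n : Int := (pm.length : Int)
  let frags : List Int := 0 :: (PySem.List.pyRange 0 (n - 1) 1).flatMap (fun i =>
      (PySem.List.pyRange (i + 1) n 1).flatMap (fun j =>
        if i == 0 || j == n - 1 then
          [PySem.List.pyGetD pm j 0 - PySem.List.pyGetD pm i 0]
        else
          [PySem.List.pyGetD pm j 0 - PySem.List.pyGetD pm i 0,
           acc - (PySem.List.pyGetD pm j 0 - PySem.List.pyGetD pm i 0)]))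
  PySem.List.sorted frags (fun x => x) false

/-- The two-pointer merge of Source B's `while` loop, as structural recursion on the
    two sorted suffixes (index advance = dropping the head). -/
def mergeCount : List Int → List Int → Int
  | [], _ => 0
  | _ :: _, [] => 0
  | a :: ls, b :: cs =>
    if a = b then 1 + mergeCount ls cs
    else if a < b then mergeCount ls (b :: cs)
    else mergeCount (a :: ls) cs
termination_by ls cs => ls.length + cs.length

def make_score_alt (peptide : List Int) (spectrum : List Int) : Int :=
  mergeCount (cyclospectrumB peptide) (PySem.List.sorted spectrum (fun x => x) false)

-- ===== PRECONDITION & SPEC =====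
def Spec_make_score (peptide : List Int) (spectrum : List Int) (out : Int) : Prop := out = make_score_alt peptide spectrum
instance (peptide : List Int) (spectrum : List Int) (out : Int) : Decidable (Spec_make_score peptide spectrum out) := by unfold Spec_make_score; infer_instance

-- ===== CLAIM (what is proved, stated in full; the proofs are below) =====
def Claim_equal_make_score : Prop := ∀ (peptide : List Int) (spectrum : List Int), Dom_make_score peptide spectrum → Spec_make_score peptide spectrum (make_score peptide spectrum)

-- ===== LEMMAS AND PROOFS =====

/-- A's scoring step. -/
def stepA (st : Int × List Int) (c : Int) : Int × List Int :=
  if st.2.contains c then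
    match PySem.List.remove? st.2 c with
    | some cs' => (st.1 + 1, cs')
    | none => st
  else st

/-- The list of prefix sums of `xs`, including the empty prefix. -/
def pref (xs : List Int) : List Int :=
  (List.range (xs.length + 1)).map (fun i => ((xs.take i).sum : Int))

theorem pref_length (xs : List Int) : (pref xs).length = xs.length + 1 := by
  simp [pref]

theorem pmA_eq_aux (xs : List Int) :
    ∀ (n : Nat), n ≤ xs.length →
      (List.range n).foldl (fun pm i => pm ++ [pm.getD i 0 + xs.getD i 0]) [0]
        = (List.range (n + 1)).map (fun i => ((xs.take i).sum : Int)) := by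
  intro n
  induction n with
  | zero => intro _; simp
  | succ n ih =>
    intro hn
    rw [List.range_succ, List.foldl_append, ih (by omega)]
    simp only [List.foldl_cons, List.foldl_nil]
    rw [PySem.List.getD_map_range _ _ _ _ (by omega : n < n + 1)]
    rw [List.range_succ (n := n + 1), List.map_append]
    simp only [List.map_cons, List.map_nil]
    congr 1
    have hlt : n < xs.length := by omega
    rw [List.getD_eq_getElem xs 0 hlt]
    rw [List.take_add_one, List.sum_append]
    simp [List.getElem?_eq_getElem hlt]

theorem pmA_eq (xs : List Int) :
    (PySem.List.pyRange 0 (xs.length : Int) 1).foldl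
      (fun pm i => pm ++ [PySem.List.pyGetD pm i 0 + PySem.List.pyGetD xs i 0]) [0]
      = pref xs := by
  rw [PySem.List.pyRange_zero_natCast, List.foldl_map]
  simp only [PySem.List.pyGetD_natCast]
  exact pmA_eq_aux xs xs.length le_rfl

theorem pmB_eq_aux (xs : List Int) :
    ∀ (a : Int) (p : List Int),
      xs.foldl (fun (st : List Int × Int) m => (st.1 ++ [st.2 + m], st.2 + m)) (p, a)
        = (p ++ (List.range xs.length).map (fun i => a + (xs.take (i + 1)).sum), a + xs.sum) := by
  induction xs with
  | nil => intro a p; simp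
  | cons x t ih =>
    intro a p
    simp only [List.foldl_cons]
    rw [ih (a + x) (p ++ [a + x])]
    simp only [Prod.mk.injEq]
    constructor
    · rw [List.length_cons, List.range_succ_eq_map, List.map_cons, List.map_map]
      simp only [List.append_assoc, List.singleton_append]
      congr 1
      · simp
        intro i _
        ring
    · simp [add_assoc]

theorem pmB_eq (xs : List Int) :
    xs.foldl (fun (st : List Int × Int) m => (st.1 ++ [st.2 + m], st.2 + m)) ([0], 0)
      = (pref xs, xs.sum) := by
  rw [pmB_eq_aux xs 0 [0]]
  simp only [Prod.mk.injEq]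
  constructor
  · rw [pref, List.range_succ_eq_map, List.map_cons, List.map_map]
    simp
  · simp

theorem pref_neg_one (xs : List Int) :
    PySem.List.pyGetD (pref xs) (-1) 0 = xs.sum := by
  simp only [PySem.List.pyGetD, PySem.List.pyGet?, pref_length]
  rw [show PySem.List.pyIdx? (xs.length + 1) (-1) = some xs.length by
    simp [PySem.List.pyIdx?]]
  simp [pref]

theorem inner_eq (pm : List Int) (i : Int) (R : List Int) (ts : List Int) :
    R.foldl (fun ts j =>
      let ts' := ts ++ [PySem.List.pyGetD pm j 0 - PySem.List.pyGetD pm i 0]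
      if 0 < i ∧ j < (pm.length : Int) - 1 then
        ts' ++ [PySem.List.pyGetD pm (-1) 0 -
                (PySem.List.pyGetD pm j 0 - PySem.List.pyGetD pm i 0)]
      else ts') ts
    = ts ++ R.flatMap (fun j =>
        if 0 < i ∧ j < (pm.length : Int) - 1 then
          [PySem.List.pyGetD pm j 0 - PySem.List.pyGetD pm i 0,
           PySem.List.pyGetD pm (-1) 0 - (PySem.List.pyGetD pm j 0 - PySem.List.pyGetD pm i 0)]
        else [PySem.List.pyGetD pm j 0 - PySem.List.pyGetD pm i 0]) := by
  rw [PySem.List.foldl_congr_mem R _ (fun acc j => acc ++ _) ts ?_]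
  · exact PySem.List.foldl_append_eq_flatMap _ R ts
  · intro acc j _
    by_cases h : 0 < i ∧ j < (pm.length : Int) - 1 <;> simp [h]

theorem cyclo_eq (xs : List Int) : cyclospectrumA xs = cyclospectrumB xs := by
  unfold cyclospectrumA cyclospectrumB
  rw [pmA_eq, pmB_eq]
  simp only []
  congr 1
  rw [PySem.List.foldl_congr_mem _ _
        (fun ts i => ts ++ (PySem.List.pyRange (i + 1) ((pref xs).length : Int) 1).flatMap
          (fun j => if 0 < i ∧ j < ((pref xs).length : Int) - 1 then
              [PySem.List.pyGetD (pref xs) j 0 - PySem.List.pyGetD (pref xs) i 0,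
               PySem.List.pyGetD (pref xs) (-1) 0 -
                 (PySem.List.pyGetD (pref xs) j 0 - PySem.List.pyGetD (pref xs) i 0)]
            else [PySem.List.pyGetD (pref xs) j 0 - PySem.List.pyGetD (pref xs) i 0])) _
        (fun acc i _ => inner_eq (pref xs) i _ acc)]
  rw [PySem.List.foldl_append_eq_flatMap]
  simp only [List.singleton_append]
  congr 1
  apply List.flatMap_congr
  intro i hi
  apply List.flatMap_congr
  intro j hj
  rw [PySem.List.mem_pyRange_one] at hi hj
  rw [pref_neg_one]
  by_cases h : 0 < i ∧ j < ((pref xs).length : Int) - 1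
  · rw [if_pos h, if_neg]
    simp only [Bool.or_eq_true, beq_iff_eq, not_or]
    omega
  · rw [if_neg h, if_pos]
    simp only [Bool.or_eq_true, beq_iff_eq]
    omega

/-- A's score loop depends on cs only through its multiset. -/
theorem stepA_perm (ls : List Int) :
    ∀ (cs cs' : List Int) (s : Int), cs.Perm cs' →
      (ls.foldl stepA (s, cs)).1 = (ls.foldl stepA (s, cs')).1 := by
  induction ls with
  | nil => intro cs cs' s _; rfl
  | cons c t ih =>
    intro cs cs' s hp
    simp only [List.foldl_cons, stepA]
    by_cases hc : c ∈ cs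
    · have hc' : c ∈ cs' := hp.mem_iff.mp hc
      rw [show cs.contains c = true by simpa [List.contains_iff_mem] using hc,
          show cs'.contains c = true by simpa [List.contains_iff_mem] using hc',
          PySem.List.remove?_eq_some_erase cs c hc,
          PySem.List.remove?_eq_some_erase cs' c hc']
      exact ih _ _ _ (hp.erase c)
    · have hc' : c ∉ cs' := fun h => hc (hp.mem_iff.mpr h)
      rw [show cs.contains c = false by simpa [List.contains_iff_mem] using hc,
          show cs'.contains c = false by simpa [List.contains_iff_mem] using hc']
      simp only [Bool.false_eq_true, if_false]
      exact ih _ _ _ hp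

/-- A value below every element of ls is never matched: it rides along at the head. -/
theorem stepA_skip (ls : List Int) :
    ∀ (cs : List Int) (s b : Int), (∀ x ∈ ls, b < x) →
      ls.foldl stepA (s, b :: cs)
        = ((ls.foldl stepA (s, cs)).1, b :: (ls.foldl stepA (s, cs)).2) := by
  induction ls with
  | nil => intro cs s b _; rfl
  | cons c t ih =>
    intro cs s b hb
    have hbc : b < c := hb c (by simp)
    have hne : c ≠ b := by omega
    simp only [List.foldl_cons, stepA]
    by_cases hc : c ∈ cs
    · have hmem : c ∈ b :: cs := by simp [hc]
      rw [show (b :: cs).contains c = true by simpa [List.contains_iff_mem] using hmem,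
          show cs.contains c = true by simpa [List.contains_iff_mem] using hc,
          PySem.List.remove?_eq_some_erase _ c hmem,
          PySem.List.remove?_eq_some_erase cs c hc,
          List.erase_cons_tail (by simpa using hne.symm)]
      exact ih _ _ _ (fun x hx => hb x (by simp [hx]))
    · have hmem : c ∉ b :: cs := by simp [hc, hne]
      rw [show (b :: cs).contains c = false by simpa [List.contains_iff_mem] using hmem,
          show cs.contains c = false by simpa [List.contains_iff_mem] using hc]
      simp only [Bool.false_eq_true, if_false]
      exact ih _ _ _ (fun x hx => hb x (by simp [hx]))

theorem foldl_stepA_nil (ls : List Int) : ∀ s : Int, (ls.foldl stepA (s, [])).1 = s := by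
  induction ls with
  | nil => intro s; rfl
  | cons c t ih =>
    intro s
    simp only [List.foldl_cons, stepA, List.contains_nil, Bool.false_eq_true, if_false]
    exact ih s

/-- On two sorted lists, A's remove-loop computes exactly the two-pointer merge count. -/
theorem stepA_merge (ls : List Int) :
    ∀ (cs : List Int) (s : Int), ls.Pairwise (· ≤ ·) → cs.Pairwise (· ≤ ·) →
      (ls.foldl stepA (s, cs)).1 = s + mergeCount ls cs := by
  induction ls with
  | nil => intro cs s _ _; simp [mergeCount]
  | cons a ls' ihl =>
    intro cs
    induction cs with
    | nil =>
      intro s hls _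
      rw [foldl_stepA_nil (a :: ls') s]
      simp [mergeCount]
    | cons b cs' ihc =>
      intro s hls hcs
      rcases lt_trichotomy a b with hab | hab | hab
      · -- a < b : a not in b::cs'
        have hnot : a ∉ b :: cs' := by
          intro h
          rcases List.mem_cons.mp h with h | h
          · omega
          · have := (List.pairwise_cons.mp hcs).1 a h; omega
        simp only [List.foldl_cons, stepA,
          show (b :: cs').contains a = false by simpa [List.contains_iff_mem] using hnot,
          Bool.false_eq_true, if_false]
        rw [ihl (b :: cs') s (List.pairwise_cons.mp hls).2 hcs]
        rw [show mergeCount (a :: ls') (b :: cs') = mergeCount ls' (b :: cs') by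
          rw [mergeCount]; rw [if_neg (by omega), if_pos hab]]
      · -- a = b : match
        subst hab
        have hmem : a ∈ a :: cs' := by simp
        simp only [List.foldl_cons, stepA,
          show (a :: cs').contains a = true by simp,
          if_true]
        rw [PySem.List.remove?_eq_some_erase _ a hmem, List.erase_cons_head]
        rw [ihl cs' (s + 1) (List.pairwise_cons.mp hls).2 (List.pairwise_cons.mp hcs).2]
        rw [show mergeCount (a :: ls') (a :: cs') = 1 + mergeCount ls' cs' by
          rw [mergeCount]; rw [if_pos rfl]]
        ring
      · -- a > b : b below everything in a::ls'
        have hb : ∀ x ∈ a :: ls', b < x := by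
          intro x hx
          rcases List.mem_cons.mp hx with h | h
          · omega
          · have := (List.pairwise_cons.mp hls).1 x h; omega
        rw [stepA_skip (a :: ls') cs' s b hb]
        rw [ihc s hls (List.pairwise_cons.mp hcs).2]
        rw [show mergeCount (a :: ls') (b :: cs') = mergeCount (a :: ls') cs' by
          rw [mergeCount]; rw [if_neg (by omega), if_neg (by omega)]]


-- ===== VERDICT (by name: the statement is the Claim_ definition above) =====
theorem make_score_spec : Claim_equal_make_score := by
  intro peptide spectrum _
  unfold Spec_make_score make_score make_score_alt
  simp only []
  rw [cyclo_eq]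
  have hls : (cyclospectrumB peptide).Pairwise (· ≤ ·) := by
    unfold cyclospectrumB
    exact PySem.List.sorted_pairwise _ _
  have hsp : (PySem.List.sorted spectrum (fun x : Int => x) false).Pairwise (· ≤ ·) := by
    simpa using PySem.List.sorted_pairwise (xs := spectrum) (key := fun x : Int => x)
  rw [show (fun (st : Int × List Int) c =>
      if st.2.contains c then
        match PySem.List.remove? st.2 c with
        | some cs' => (st.1 + 1, cs')
        | none => st
      else st) = stepA from rfl]
  rw [stepA_perm _ spectrum (PySem.List.sorted spectrum (fun x => x) false) 0
        (PySem.List.sorted_perm (xs := spectrum) (key := fun x : Int => x) (rev := false)).symm]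
  rw [stepA_merge _ _ 0 hls hsp]
  ring
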